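-- pv_equiv track=rewrite | github.com/pajarcupetre/AdventOfCode-2020 | src/questions_day6.py | same_questions
-- ===== SOURCE A (Python) =====
-- import string
--
-- def same_questions(list_of_responses):
--     questions_common = set(string.ascii_lowercase)
--     for respone in list_of_responses:
--         questions_per_answer = set()
--         for question in respone:
--             questions_per_answer.add(question)
--         questions_common = questions_common.intersection(questions_per_answer)
--     return len(questions_common)
-- ===== SOURCE B (Python) =====
-- import string
--
-- def same_questions(list_of_responses):
--     counts = {}
--     for response in list_of_responses:
--         for c in set(response):
--             counts[c] = counts.get(c, 0) + 1
--     n = len(list_of_responses)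
--     return sum(1 for c in string.ascii_lowercase if counts.get(c, 0) == n)
-- ===== Notes on version B (the rewrite author's own statement) =====
-- stated objective: alternative
-- what changed: Replaces the running set-intersection over responses by a single pass that tallies, per character, how many responses contain it (distinct chars per response counted once), then counts the lowercase letters whose tally equals the number of responses.
import Mathlib
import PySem

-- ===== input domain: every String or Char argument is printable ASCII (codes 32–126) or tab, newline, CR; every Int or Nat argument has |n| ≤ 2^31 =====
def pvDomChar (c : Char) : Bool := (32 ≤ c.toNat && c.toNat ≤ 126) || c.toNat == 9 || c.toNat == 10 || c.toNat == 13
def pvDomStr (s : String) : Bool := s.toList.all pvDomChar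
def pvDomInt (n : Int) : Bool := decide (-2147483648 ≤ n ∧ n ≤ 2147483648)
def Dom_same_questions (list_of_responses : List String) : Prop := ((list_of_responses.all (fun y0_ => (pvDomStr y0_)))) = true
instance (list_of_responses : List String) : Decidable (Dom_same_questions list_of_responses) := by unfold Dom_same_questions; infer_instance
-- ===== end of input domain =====

-- B replaces A's running set intersection by a single frequency-table pass plus a
-- threshold count over the alphabet (objective: simpler/alternative, same exact values).

-- ===== PORT A =====
-- questions_common = set(ascii_lowercase); for each response intersect with its char set; len at the end
def same_questions (list_of_responses : List String) : Int :=
  PySem.Set.len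
    (list_of_responses.foldl
      (fun questions_common respone =>
        PySem.Set.inter questions_common
          (respone.toList.foldl PySem.Set.add PySem.Set.empty))
      (PySem.Set.ofList "abcdefghijklmnopqrstuvwxyz".toList))

-- ===== PORT B =====
-- counts[c] = number of responses containing c (each response's distinct chars counted once);
-- answer = number of lowercase letters whose count equals len(list_of_responses)
def same_questions_alt (list_of_responses : List String) : Int :=
  (("abcdefghijklmnopqrstuvwxyz".toList.countP
      (fun c =>
        (list_of_responses.foldl
          (fun counts response =>
            (PySem.Set.ofList response.toList).foldl
              (fun counts c => counts.insert c (counts.getD c 0 + 1)) counts)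
          PySem.Dict.empty).getD c 0 == (list_of_responses.length : Int)) : Nat) : Int)

-- ===== PRECONDITION & SPEC =====
def Spec_same_questions (list_of_responses : List String) (out : Int) : Prop := out = same_questions_alt list_of_responses
instance (list_of_responses : List String) (out : Int) : Decidable (Spec_same_questions list_of_responses out) := by unfold Spec_same_questions; infer_instance

-- ===== CLAIM (what is proved, stated in full; the proofs are below) =====
def Claim_equal_same_questions : Prop := ∀ (list_of_responses : List String), Dom_same_questions list_of_responses → Spec_same_questions list_of_responses (same_questions list_of_responses)

-- ===== LEMMAS AND PROOFS =====

-- A's fold of intersections filters the initial set by "c appears in every response".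
theorem foldl_inter_eq_filter (L : List String) (s : PySem.Set Char) :
    L.foldl (fun qc r => PySem.Set.inter qc (r.toList.foldl PySem.Set.add PySem.Set.empty)) s
      = s.filter (fun c => L.all (fun r => decide (c ∈ r.toList))) := by
  induction L generalizing s with
  | nil => simp
  | cons r L ih =>
      rw [List.foldl_cons, ih]
      simp only [PySem.Set.inter]
      rw [List.filter_filter]
      apply List.filter_congr
      intro c _
      rw [show (PySem.Set.empty : PySem.Set Char) = ([] : List Char) from rfl,
        ← PySem.Set.ofList_eq_foldl]
      simp [PySem.Set.mem_ofList, Bool.and_comm]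

-- B's nested fold is a membership counter.
theorem getD_counts (L : List String) (d : PySem.Dict Char Int) (c : Char) :
    (L.foldl (fun counts response =>
        (PySem.Set.ofList response.toList).foldl
          (fun counts x => counts.insert x (counts.getD x 0 + 1)) counts) d).getD c 0
      = d.getD c 0 + (L.countP (fun r => decide (c ∈ r.toList)) : Int) := by
  induction L generalizing d with
  | nil => simp
  | cons r L ih =>
      simp only [List.foldl_cons, ih, List.countP_cons]
      rw [PySem.Dict.getD_foldl_insert_add_one]
      have hnd := PySem.Set.nodup_ofList (α := Char) r.toList
      by_cases h : c ∈ r.toList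
      · rw [List.count_eq_one_of_mem hnd (by rwa [PySem.Set.mem_ofList])]
        simp [h]; ring
      · rw [List.count_eq_zero_of_not_mem (by rwa [PySem.Set.mem_ofList])]
        simp [h]

-- ===== VERDICT (by name: the statement is the Claim_ definition above) =====
theorem same_questions_spec : Claim_equal_same_questions := by
  intro L _
  show same_questions L = same_questions_alt L
  unfold same_questions same_questions_alt
  rw [foldl_inter_eq_filter]
  simp only [PySem.Set.len]
  rw [← List.countP_eq_length_filter,
    PySem.Set.ofList_eq_self_of_nodup (xs := "abcdefghijklmnopqrstuvwxyz".toList) (by decide)]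
  congr 1
  apply List.countP_congr
  intro c _
  rw [getD_counts]
  simp only [PySem.Dict.getD_empty, zero_add, beq_iff_eq, List.all_eq_true,
    Nat.cast_inj, decide_eq_true_eq]
  constructor
  · intro h
    have : L.countP (fun r => decide (c ∈ r.toList)) = L.length :=
      List.countP_eq_length.mpr (by simpa using h)
    exact_mod_cast this
  · intro h
    have : L.countP (fun r => decide (c ∈ r.toList)) = L.length := by exact_mod_cast h
    simpa using List.countP_eq_length.mp this
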